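-- pv_equiv track=rewrite | github.com/piyushgirisingh/Mood2Food | MachineLearning/app.py | _extract_key_phrases
-- ===== SOURCE A (Python) =====
-- def _extract_key_phrases(response):
--     """Extract key phrases from successful responses"""
--     phrases = []
--     response_lower = response.lower()
--
--     # Common successful phrases
--     success_indicators = [
--         'try', 'consider', 'suggest', 'instead', 'alternative',
--         'breathing', 'walk', 'music', 'journal', 'meditation',
--         'remember', 'noticed', 'pattern', 'helpful'
--     ]
--
--     for indicator in success_indicators:
--         if indicator in response_lower:
--             # Extract the sentence containing the indicator
--             sentences = response.split('.')
--             for sentence in sentences: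
--                 if indicator in sentence.lower():
--                     phrases.append(sentence.strip())
--                     break
--
--     return phrases[:3]  # Return top 3 phrases
-- ===== SOURCE B (Python) =====
-- def _extract_key_phrases(response):
--     """Extract key phrases from successful responses"""
--     success_indicators = [
--         'try', 'consider', 'suggest', 'instead', 'alternative',
--         'breathing', 'walk', 'music', 'journal', 'meditation',
--         'remember', 'noticed', 'pattern', 'helpful'
--     ]
--     index = {}
--     for sentence in response.split('.'):
--         low = sentence.lower()
--         for ind in success_indicators:
--             if ind not in index and ind in low:
--                 index[ind] = sentence.strip()
--     return [index[i] for i in success_indicators if i in index][:3]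
-- ===== Notes on version B (the rewrite author's own statement) =====
-- stated objective: alternative
-- what changed: A re-splits the response and re-scans all sentences once per indicator; B splits once and makes a single pass over the sentences building a first-match dict per indicator, then emits in indicator order.
import Mathlib
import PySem

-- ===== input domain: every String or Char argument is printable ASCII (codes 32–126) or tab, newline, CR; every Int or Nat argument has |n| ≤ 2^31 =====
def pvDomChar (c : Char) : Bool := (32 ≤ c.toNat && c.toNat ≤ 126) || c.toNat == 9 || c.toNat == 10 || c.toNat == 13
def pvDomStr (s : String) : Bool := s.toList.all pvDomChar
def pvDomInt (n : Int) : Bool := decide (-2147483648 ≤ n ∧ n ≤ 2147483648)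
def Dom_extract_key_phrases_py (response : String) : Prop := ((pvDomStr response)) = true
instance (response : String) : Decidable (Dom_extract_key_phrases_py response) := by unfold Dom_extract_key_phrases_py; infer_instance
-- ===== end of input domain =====

-- B replaces A's per-indicator re-split and re-scan of all sentences by one split and a single
-- sentence pass building a first-match dict, then emits in indicator order (objective: alternative).

-- the shared literal list of success indicators
def pvIndicators : List String :=
  ["try", "consider", "suggest", "instead", "alternative",
   "breathing", "walk", "music", "journal", "meditation",
   "remember", "noticed", "pattern", "helpful"]

-- ===== PORT A =====
-- A's inner 'for sentence in sentences: if indicator in sentence.lower(): append(strip); break'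
def pvFirstSentence (ind : String) : List String → Option String
  | [] => none
  | s :: rest =>
    if PySem.Str.isIn ind (PySem.Str.lower s) then some (PySem.Str.strip s)
    else pvFirstSentence ind rest

def extract_key_phrases_py (response : String) : List String :=
  let response_lower := PySem.Str.lower response
  let phrases := pvIndicators.foldl (fun phrases ind =>
    if PySem.Str.isIn ind response_lower then
      let sentences := (PySem.Str.split? response ".").getD []   -- sep "." ≠ "", never none
      match pvFirstSentence ind sentences with
      | some p => phrases ++ [p]
      | none => phrases
    else phrases) []
  PySem.List.slice phrases none (some 3)

-- ===== PORT B =====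
def extract_key_phrases_py_alt (response : String) : List String :=
  let sentences := (PySem.Str.split? response ".").getD []   -- sep "." ≠ "", never none
  let index := sentences.foldl (fun d s =>
    pvIndicators.foldl (fun d ind =>
      if !d.contains ind && PySem.Str.isIn ind (PySem.Str.lower s)
      then d.insert ind (PySem.Str.strip s) else d) d)
    (PySem.Dict.empty : PySem.Dict String String)
  PySem.List.slice (pvIndicators.foldl (fun acc i =>
      match index.get? i with
      | some v => acc ++ [v]
      | none => acc) []) none (some 3)

-- ===== PRECONDITION & SPEC =====
def Spec_extract_key_phrases_py (response : String) (out : List String) : Prop := out = extract_key_phrases_py_alt response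
instance (response : String) (out : List String) : Decidable (Spec_extract_key_phrases_py response out) := by unfold Spec_extract_key_phrases_py; infer_instance

-- ===== CLAIM (what is proved, stated in full; the proofs are below) =====
def Claim_equal_extract_key_phrases_py : Prop := ∀ (response : String), Dom_extract_key_phrases_py response → Spec_extract_key_phrases_py response (extract_key_phrases_py response)

-- ===== LEMMAS AND PROOFS =====

-- every piece produced by splitOn.go is an earlier piece or an infix of the remaining text
lemma pvGo_infix (sep : List Char) :
    ∀ (fuel : Nat) (l cur : List Char) (acc : List (List Char)),
      ∀ p ∈ PySem.Chars.splitOn.go sep fuel l cur acc, p ∈ acc ∨ p <:+: (cur.reverse ++ l) := by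
  intro fuel
  induction fuel with
  | zero =>
    intro l cur acc p hp
    simp [PySem.Chars.splitOn.go] at hp
    rcases hp with h | rfl
    · exact Or.inl h
    · exact Or.inr (List.infix_refl _)
  | succ n ih =>
    intro l cur acc p hp
    cases l with
    | nil =>
      simp [PySem.Chars.splitOn.go] at hp
      rcases hp with h | rfl
      · exact Or.inl h
      · exact Or.inr (by simp)
    | cons c rest =>
      rw [PySem.Chars.splitOn.go] at hp
      by_cases hpre : sep.isPrefixOf (c :: rest) = true
      · rw [if_pos hpre] at hp
        rcases ih _ _ _ _ hp with h | h
        · rcases List.mem_cons.mp h with rfl | h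
          · exact Or.inr (List.prefix_append _ _).isInfix
          · exact Or.inl h
        · refine Or.inr (h.trans ?_)
          simp only [List.reverse_nil, List.nil_append]
          exact ((List.drop_suffix _ _).trans (List.suffix_append _ _)).isInfix
      · rw [if_neg hpre] at hp
        rcases ih _ _ _ _ hp with h | h
        · exact Or.inl h
        · exact Or.inr (by simpa [List.append_assoc] using h)

lemma pvSplitOn_infix (s sep : List Char) :
    ∀ p ∈ PySem.Chars.splitOn s sep, p <:+: s := by
  intro p hp
  have := pvGo_infix sep (s.length + 1) s [] [] p hp
  simpa using this

-- each sentence of response.split('.') is an infix of response (on code points)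
lemma pvSentence_infix (response : String) :
    ∀ s ∈ (PySem.Str.split? response ".").getD [], s.toList <:+: response.toList := by
  intro s hs
  have hmap := PySem.Str.split?_map response "."
  have hchars : PySem.Chars.split? response.toList ".".toList
      = some (PySem.Chars.splitOn response.toList ".".toList) := by
    simp [PySem.Chars.split?]
  rw [hchars] at hmap
  cases hsp : PySem.Str.split? response "." with
  | none => rw [hsp] at hmap; simp at hmap
  | some ss =>
    rw [hsp] at hmap
    simp only [Option.map_some, Option.some.injEq] at hmap
    rw [hsp] at hs
    simp only [Option.getD_some] at hs
    apply pvSplitOn_infix response.toList ".".toList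
    rw [← hmap]
    exact List.mem_map_of_mem hs

-- if an indicator occurs in the lowercase of an infix, it occurs in the lowercase of the whole
lemma pvIsIn_of_infix (ind s r : String) (hinf : s.toList <:+: r.toList)
    (h : PySem.Str.isIn ind (PySem.Str.lower s) = true) :
    PySem.Str.isIn ind (PySem.Str.lower r) = true := by
  rw [PySem.Str.isIn_iff_infix] at h ⊢
  rw [PySem.Str.toList_lower] at h ⊢
  simp only [PySem.Chars.lower] at h ⊢
  exact h.trans (hinf.map _)

-- if A's inner scan finds a sentence, the indicator occurs in response.lower()
lemma pvFirstSentence_isIn (ind : String) (response : String)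
    (hss : ∀ s ∈ (PySem.Str.split? response ".").getD [], s.toList <:+: response.toList) :
    ∀ p, pvFirstSentence ind ((PySem.Str.split? response ".").getD []) = some p →
      PySem.Str.isIn ind (PySem.Str.lower response) = true := by
  generalize hL : (PySem.Str.split? response ".").getD [] = ss at hss
  clear hL
  induction ss with
  | nil => intro p hp; simp [pvFirstSentence] at hp
  | cons s rest ih =>
    intro p hp
    by_cases h : PySem.Str.isIn ind (PySem.Str.lower s) = true
    · exact pvIsIn_of_infix ind s response (hss s (by simp)) h
    · rw [pvFirstSentence, if_neg h] at hp
      exact ih (fun t ht => hss t (by simp [ht])) p hp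

-- the inner indicator loop of B's sentence pass, at one key
lemma pvInner (s : String) (inds : List String) (d : PySem.Dict String String) (ind : String) :
    (inds.foldl (fun d i =>
        if !d.contains i && PySem.Str.isIn i (PySem.Str.lower s)
        then d.insert i (PySem.Str.strip s) else d) d).get? ind
      = if ind ∈ inds ∧ d.get? ind = none ∧ PySem.Str.isIn ind (PySem.Str.lower s) = true
        then some (PySem.Str.strip s) else d.get? ind := by
  induction inds generalizing d with
  | nil => simp
  | cons i rest ih =>
    simp only [List.foldl_cons]
    rw [ih]
    by_cases hi : ind = i
    · subst hi
      by_cases hnone : d.get? ind = none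
      · by_cases hin : PySem.Chars.isIn ind.toList (PySem.Chars.lower s.toList) = true
        · have hc : d.contains ind = false := by
            rw [PySem.Dict.contains_eq_isSome_get?, hnone]; rfl
          simp [hc, hin, hnone, PySem.Dict.get?_insert_self]
        · simp [hin, hnone]
      · have hc : d.contains ind = true := by
          rw [PySem.Dict.contains_eq_isSome_get?]
          cases h : d.get? ind with
          | none => exact absurd h hnone
          | some v => rfl
        simp [hc, hnone]
    · have hstep : (if !d.contains i && PySem.Str.isIn i (PySem.Str.lower s)
          then d.insert i (PySem.Str.strip s) else d).get? ind = d.get? ind := by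
        split
        · exact PySem.Dict.get?_insert_of_ne d _ hi
        · rfl
      rw [hstep]
      by_cases hmem : ind ∈ rest
      · simp [hmem, hi]
      · simp [hmem, hi]

-- B's one-pass index holds, for each indicator, the first matching sentence (stripped)
lemma pvIndex_eq (ind : String) (hmem : ind ∈ pvIndicators) :
    ∀ (ss : List String) (d : PySem.Dict String String),
      (ss.foldl (fun d s =>
          pvIndicators.foldl (fun d i =>
            if !d.contains i && PySem.Str.isIn i (PySem.Str.lower s)
            then d.insert i (PySem.Str.strip s) else d) d) d).get? ind
        = (d.get? ind).or (pvFirstSentence ind ss) := by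
  intro ss
  induction ss with
  | nil => intro d; simp [pvFirstSentence]
  | cons s rest ih =>
    intro d
    simp only [List.foldl_cons]
    rw [ih, pvInner]
    cases hd : d.get? ind with
    | some v => simp [pvFirstSentence]
    | none =>
      by_cases hin : PySem.Chars.isIn ind.toList (PySem.Chars.lower s.toList) = true
      · simp [hmem, hin, pvFirstSentence]
      · simp [hmem, hin, pvFirstSentence]

-- the emission folds of the two ports agree
lemma pvFold_eq (response : String) :
    pvIndicators.foldl (fun phrases ind =>
      if PySem.Str.isIn ind (PySem.Str.lower response) then
        match pvFirstSentence ind ((PySem.Str.split? response ".").getD []) with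
        | some p => phrases ++ [p]
        | none => phrases
      else phrases) [] =
    pvIndicators.foldl (fun acc i =>
      match (List.foldl (fun d s =>
        pvIndicators.foldl (fun d ind =>
          if !d.contains ind && PySem.Str.isIn ind (PySem.Str.lower s)
          then d.insert ind (PySem.Str.strip s) else d) d)
        (PySem.Dict.empty : PySem.Dict String String)
        ((PySem.Str.split? response ".").getD [])).get? i with
      | some v => acc ++ [v]
      | none => acc) [] := by
  apply PySem.List.foldl_congr_mem
  intro acc ind hmem
  rw [pvIndex_eq ind hmem, PySem.Dict.get?_empty, Option.none_or]
  cases hfs : pvFirstSentence ind ((PySem.Str.split? response ".").getD []) with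
  | some p => rw [if_pos (pvFirstSentence_isIn ind response (pvSentence_infix response) p hfs)]
  | none =>
    by_cases hin : PySem.Str.isIn ind (PySem.Str.lower response) = true
    · rw [if_pos hin]
    · rw [if_neg hin]

-- ===== VERDICT (by name: the statement is the Claim_ definition above) =====
theorem extract_key_phrases_py_spec : Claim_equal_extract_key_phrases_py := by
  intro response _
  show extract_key_phrases_py response = extract_key_phrases_py_alt response
  rw [extract_key_phrases_py, extract_key_phrases_py_alt]
  exact congrArg (fun l => PySem.List.slice l none (some 3)) (pvFold_eq response)
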